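-- pv_equiv track=rewrite | github.com/OptimalScale/LMFlow | tests/models/test_hf_decoder_model.py | make_gt_from_conversation_ids
-- ===== SOURCE A (Python) =====
-- def make_gt_from_conversation_ids(conversation_ids):
--     res = {"input_ids": [], "attention_mask": [], "labels": []}
--     for turn_idx, turn_content in enumerate(conversation_ids):
--         user_content = turn_content[0]
--         assistant_content = turn_content[1]
--         res["input_ids"].extend(user_content)
--         res["input_ids"].extend(assistant_content)
--         res['attention_mask'].extend([1] * len(user_content) + [1] * len(assistant_content))
--         res['labels'].extend([-100] * len(user_content))
--         res['labels'].extend(assistant_content)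
--     return res
-- ===== SOURCE B (Python) =====
-- def make_gt_from_conversation_ids(conversation_ids):
--     # Build back-to-front: walk the turns in reverse, prepending each turn's
--     # segments; attention_mask is derived from the final length.
--     input_ids = []
--     labels = []
--     for turn in reversed(conversation_ids):
--         input_ids = turn[0] + turn[1] + input_ids
--         labels = [-100] * len(turn[0]) + turn[1] + labels
--     return {
--         "input_ids": input_ids,
--         "attention_mask": [1] * len(input_ids),
--         "labels": labels,
--     }
-- ===== Notes on version B (the rewrite author's own statement) =====
-- stated objective: alternative
-- what changed: Builds the result back-to-front: iterates the turns in reverse and PREPENDS each turn's segments to two accumulators (a right fold instead of A's forward loop with three extends), and derives attention_mask as [1]*len(input_ids) from the final length instead of accumulating it per turn.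
import Mathlib
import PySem

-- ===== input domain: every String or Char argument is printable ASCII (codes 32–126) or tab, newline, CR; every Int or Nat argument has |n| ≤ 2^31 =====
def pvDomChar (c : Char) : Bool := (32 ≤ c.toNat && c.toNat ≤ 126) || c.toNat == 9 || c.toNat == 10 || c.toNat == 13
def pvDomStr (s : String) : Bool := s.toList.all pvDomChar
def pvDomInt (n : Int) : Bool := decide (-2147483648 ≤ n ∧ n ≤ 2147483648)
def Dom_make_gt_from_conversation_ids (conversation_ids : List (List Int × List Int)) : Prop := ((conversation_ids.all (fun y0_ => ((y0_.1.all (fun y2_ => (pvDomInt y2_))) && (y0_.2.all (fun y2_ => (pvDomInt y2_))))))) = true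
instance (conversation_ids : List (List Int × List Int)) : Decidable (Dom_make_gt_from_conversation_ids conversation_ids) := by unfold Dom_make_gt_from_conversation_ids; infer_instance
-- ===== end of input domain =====

-- B builds the result back-to-front (reverse iteration, prepending segments) and derives
-- attention_mask from the final length (objective: alternative decomposition, same cost class).

-- ===== PORT A =====
-- one forward fold over the turns carrying the three growing lists (input_ids, attention_mask, labels)
def make_gt_from_conversation_ids (conversation_ids : List (List Int × List Int)) : List (String × List Int) :=
  let res := conversation_ids.foldl
    (fun (r : List Int × List Int × List Int) turn_content =>
      let user_content := turn_content.1
      let assistant_content := turn_content.2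
      (r.1 ++ user_content ++ assistant_content,
       r.2.1 ++ (List.replicate user_content.length (1 : Int) ++ List.replicate assistant_content.length (1 : Int)),
       r.2.2 ++ List.replicate user_content.length (-100 : Int) ++ assistant_content))
    ([], [], [])
  [("input_ids", res.1), ("attention_mask", res.2.1), ("labels", res.2.2)]

-- ===== PORT B =====
-- reverse iteration prepending onto two accumulators = a right fold over the turns;
-- the mask comes from the final input_ids length
def make_gt_from_conversation_ids_alt (conversation_ids : List (List Int × List Int)) : List (String × List Int) :=
  let p := conversation_ids.foldr
    (fun turn (acc : List Int × List Int) =>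
      (turn.1 ++ turn.2 ++ acc.1,
       List.replicate turn.1.length (-100 : Int) ++ turn.2 ++ acc.2))
    ([], [])
  [("input_ids", p.1),
   ("attention_mask", List.replicate p.1.length (1 : Int)),
   ("labels", p.2)]

-- ===== PRECONDITION & SPEC =====
def Spec_make_gt_from_conversation_ids (conversation_ids : List (List Int × List Int)) (out : List (String × List Int)) : Prop := out = make_gt_from_conversation_ids_alt conversation_ids
instance (conversation_ids : List (List Int × List Int)) (out : List (String × List Int)) : Decidable (Spec_make_gt_from_conversation_ids conversation_ids out) := by unfold Spec_make_gt_from_conversation_ids; infer_instance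

-- ===== CLAIM =====
def Claim_equal_make_gt_from_conversation_ids : Prop := ∀ (conversation_ids : List (List Int × List Int)), Dom_make_gt_from_conversation_ids conversation_ids → Spec_make_gt_from_conversation_ids conversation_ids (make_gt_from_conversation_ids conversation_ids)

-- ===== LEMMAS AND PROOFS =====

-- A's fold appends, per turn, the three per-turn segments to the accumulators
theorem make_gt_fold_inv (cs : List (List Int × List Int)) (a b c : List Int) :
    cs.foldl
      (fun (r : List Int × List Int × List Int) turn_content =>
        let user_content := turn_content.1
        let assistant_content := turn_content.2
        (r.1 ++ user_content ++ assistant_content,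
         r.2.1 ++ (List.replicate user_content.length (1 : Int) ++ List.replicate assistant_content.length (1 : Int)),
         r.2.2 ++ List.replicate user_content.length (-100 : Int) ++ assistant_content))
      (a, b, c)
    = (a ++ cs.flatMap (fun t => t.1 ++ t.2),
       b ++ cs.flatMap (fun t => List.replicate t.1.length (1 : Int) ++ List.replicate t.2.length (1 : Int)),
       c ++ cs.flatMap (fun t => List.replicate t.1.length (-100 : Int) ++ t.2)) := by
  induction cs generalizing a b c with
  | nil => simp
  | cons h t ih =>
    rw [List.foldl_cons, ih]
    simp [List.append_assoc]

-- B's right fold produces the same two flattened lists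
theorem make_gt_foldr_eq (cs : List (List Int × List Int)) :
    cs.foldr
      (fun turn (acc : List Int × List Int) =>
        (turn.1 ++ turn.2 ++ acc.1,
         List.replicate turn.1.length (-100 : Int) ++ turn.2 ++ acc.2))
      ([], [])
    = (cs.flatMap (fun t => t.1 ++ t.2),
       cs.flatMap (fun t => List.replicate t.1.length (-100 : Int) ++ t.2)) := by
  induction cs with
  | nil => simp
  | cons h t ih => rw [List.foldr_cons, ih]; simp [List.append_assoc]

-- the mask of the concatenation is all-ones of the concatenation's length
theorem mask_eq_replicate (cs : List (List Int × List Int)) :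
    cs.flatMap (fun t => List.replicate t.1.length (1 : Int) ++ List.replicate t.2.length (1 : Int))
      = List.replicate (cs.flatMap (fun t => t.1 ++ t.2)).length (1 : Int) := by
  induction cs with
  | nil => simp
  | cons h t ih =>
    simp [ih, List.replicate_add, List.append_assoc, -List.replicate_append_replicate]

-- ===== VERDICT =====
theorem make_gt_from_conversation_ids_spec : Claim_equal_make_gt_from_conversation_ids := by
  intro cs _
  unfold Spec_make_gt_from_conversation_ids make_gt_from_conversation_ids make_gt_from_conversation_ids_alt
  rw [make_gt_fold_inv, make_gt_foldr_eq, mask_eq_replicate]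
  simp
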